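-- pv_equiv track=rewrite | github.com/casePloeg/kattis | pure.py | compute_number_score
-- ===== SOURCE A (Python) =====
-- def compute_number_score(number):
--     score = 0
--     if number % 3 == 0:
--         score += 4
--     seq = 0
--     twos = 0
--     last = -2
--     while number > 0:
--         digit = number % 10
--
--
--         if (last != digit - 1):
--             score += seq * seq
--             seq = 1
--         else:
--             seq += 1
--
--         if digit == 7:
--             score += 5
--
--         if digit == 2:
--             twos += 1
--         else:
--             twos = 0
--
--         if twos > 1:
--             score += 6
--
--         if digit % 2 == 0:
--             score += 3
--         last = digit
--         number = number // 10
--     score += seq * seq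
--     return score
-- ===== SOURCE B (Python) =====
-- def compute_number_score(number):
--     # extract digits LSB-first
--     digits = []
--     n = number
--     while n > 0:
--         digits.append(n % 10)
--         n //= 10
--     base = 4 if number % 3 == 0 else 0
--     sevens = 5 * digits.count(7)
--     evens = 3 * len([d for d in digits if d % 2 == 0])
--     # squares of maximal ascending(+1) runs, seeded with prev=-2 like a fresh run
--     runsq = 0
--     runlen = 0
--     prev = -2
--     for d in digits:
--         if prev == d - 1:
--             runlen += 1
--         else:
--             runsq += runlen * runlen
--             runlen = 1
--         prev = d
--     runsq += runlen * runlen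
--     # 6 points per digit beyond the first in each maximal run of 2s
--     two_bonus = 0
--     streak = 0
--     for d in digits:
--         streak = streak + 1 if d == 2 else 0
--         if streak > 1:
--             two_bonus += 6
--     return base + sevens + evens + runsq + two_bonus
-- ===== Notes on version B (the rewrite author's own statement) =====
-- stated objective: alternative
-- what changed: A fuses everything into one while-loop over the number with five interleaved counters; B first materialises the LSB-first digit list and then computes each score component in its own independent pass (count of 7s, count of even digits, ascending-run squares, runs-of-2 bonus) and sums them.
import Mathlib
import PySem

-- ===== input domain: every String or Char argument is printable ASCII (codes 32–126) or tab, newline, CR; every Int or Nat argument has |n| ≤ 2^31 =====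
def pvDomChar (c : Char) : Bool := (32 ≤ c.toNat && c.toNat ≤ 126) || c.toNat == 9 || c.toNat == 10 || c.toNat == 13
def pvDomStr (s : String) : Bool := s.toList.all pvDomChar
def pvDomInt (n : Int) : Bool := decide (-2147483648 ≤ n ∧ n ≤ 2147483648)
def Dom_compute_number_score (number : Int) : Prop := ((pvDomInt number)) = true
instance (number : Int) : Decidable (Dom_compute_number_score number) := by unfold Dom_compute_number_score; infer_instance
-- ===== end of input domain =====

-- B replaces A's single fused digit loop by a digit-list extraction plus one
-- independent pass per score component (objective: alternative decomposition).

-- ===== PORT A =====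
-- the while-loop of A, carrying (score, seq, twos, last)
def csLoop (number score seq twos last : Int) : Int :=
  if number > 0 then
    let digit := PySem.Int.mod number 10
    -- A's if/else: either flush seq*seq into score and restart seq, or extend seq
    let score1 := if last ≠ digit - 1 then score + seq * seq else score
    let seq1   : Int := if last ≠ digit - 1 then 1 else seq + 1
    let score2 := if digit = 7 then score1 + 5 else score1
    let twos1  : Int := if digit = 2 then twos + 1 else 0
    let score3 := if twos1 > 1 then score2 + 6 else score2
    let score4 := if PySem.Int.mod digit 2 = 0 then score3 + 3 else score3
    csLoop (PySem.Int.floordiv number 10) score4 seq1 twos1 digit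
  else
    score + seq * seq
termination_by number.toNat
decreasing_by
  rw [PySem.Int.floordiv_eq_ediv_of_pos (by omega : (0:Int) < 10)]
  omega

def compute_number_score (number : Int) : Int :=
  let score : Int := if PySem.Int.mod number 3 = 0 then 0 + 4 else 0
  csLoop number score 0 0 (-2)

-- ===== PORT B =====
-- the digit-extraction while-loop of B (LSB first)
def altDigits (n : Int) : List Int :=
  if n > 0 then PySem.Int.mod n 10 :: altDigits (PySem.Int.floordiv n 10) else []
termination_by n.toNat
decreasing_by
  rw [PySem.Int.floordiv_eq_ediv_of_pos (by omega : (0:Int) < 10)]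
  omega

-- pass 3 of B: squares of maximal ascending(+1) runs
def altRunsq (digits : List Int) : Int :=
  let s := digits.foldl
    (fun (s : Int × Int × Int) d =>
      let (runsq, runlen, prev) := s
      if prev = d - 1 then (runsq, runlen + 1, d) else (runsq + runlen * runlen, 1, d))
    (0, 0, -2)
  s.1 + s.2.1 * s.2.1

-- pass 4 of B: 6 points per digit beyond the first in each maximal run of 2s
def altTwoBonus (digits : List Int) : Int :=
  (digits.foldl
    (fun (s : Int × Int) d =>
      let streak := if d = 2 then s.2 + 1 else (0 : Int)
      (if streak > 1 then s.1 + 6 else s.1, streak))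
    (0, 0)).1

def compute_number_score_alt (number : Int) : Int :=
  let digits := altDigits number
  let base : Int := if PySem.Int.mod number 3 = 0 then 4 else 0
  let sevens : Int := 5 * (digits.count 7 : Int)
  let evens : Int := 3 * ((digits.filter (fun d => PySem.Int.mod d 2 = 0)).length : Int)
  base + sevens + evens + altRunsq digits + altTwoBonus digits

-- ===== PRECONDITION & SPEC =====
def Spec_compute_number_score (number : Int) (out : Int) : Prop := out = compute_number_score_alt number
instance (number : Int) (out : Int) : Decidable (Spec_compute_number_score number out) := by unfold Spec_compute_number_score; infer_instance

-- ===== CLAIM (what is proved, stated in full; the proofs are below) =====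
def Claim_equal_compute_number_score : Prop := ∀ (number : Int), Dom_compute_number_score number → Spec_compute_number_score number (compute_number_score number)

-- ===== LEMMAS AND PROOFS =====

-- recursive versions of B's run passes, parametrised by the loop state
def runsqGo (ds : List Int) (runlen last : Int) : Int :=
  match ds with
  | [] => runlen * runlen
  | d :: ds => if last = d - 1 then runsqGo ds (runlen + 1) d
               else runlen * runlen + runsqGo ds 1 d

def twoGo (ds : List Int) (twos : Int) : Int :=
  match ds with
  | [] => 0
  | d :: ds =>
      let t := if d = 2 then twos + 1 else (0 : Int)
      (if t > 1 then 6 else 0) + twoGo ds t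

lemma altRunsq_foldl (ds : List Int) (rq rl pv : Int) :
    (let s := ds.foldl
        (fun (s : Int × Int × Int) d =>
          let (runsq, runlen, prev) := s
          if prev = d - 1 then (runsq, runlen + 1, d) else (runsq + runlen * runlen, 1, d))
        (rq, rl, pv)
     s.1 + s.2.1 * s.2.1) = rq + runsqGo ds rl pv := by
  induction ds generalizing rq rl pv with
  | nil => simp [runsqGo]
  | cons d ds ih =>
      simp only [List.foldl_cons, runsqGo]
      by_cases h : pv = d - 1 <;> simp [h, ih] <;> ring

lemma altTwoBonus_foldl (ds : List Int) (tb st : Int) :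
    (ds.foldl
      (fun (s : Int × Int) d =>
        let streak := if d = 2 then s.2 + 1 else (0 : Int)
        (if streak > 1 then s.1 + 6 else s.1, streak))
      (tb, st)).1 = tb + twoGo ds st := by
  induction ds generalizing tb st with
  | nil => simp [twoGo]
  | cons d ds ih =>
      simp only [List.foldl_cons, twoGo]
      by_cases h : d = 2 <;> simp only [h, if_pos, if_neg, reduceIte] <;>
        split_ifs with h2 <;> simp [ih] <;> ring

set_option maxHeartbeats 1600000 in
lemma csLoop_eq_fuel (k : Nat) : ∀ n : Int, n.toNat ≤ k → ∀ score seq twos last : Int,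
    csLoop n score seq twos last =
      score + 5 * ((altDigits n).count 7 : Int)
        + 3 * (((altDigits n).filter (fun d => PySem.Int.mod d 2 = 0)).length : Int)
        + runsqGo (altDigits n) seq last + twoGo (altDigits n) twos := by
  induction k with
  | zero =>
      intro n hn score seq twos last
      have hpos : ¬ n > 0 := by omega
      rw [csLoop, altDigits]
      simp [hpos, runsqGo, twoGo]
  | succ k ih =>
      intro n hn score seq twos last
      by_cases hpos : n > 0
      · have hlt : (PySem.Int.floordiv n 10).toNat ≤ k := by
          rw [PySem.Int.floordiv_eq_ediv_of_pos (by omega : (0:Int) < 10)]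
          omega
        rw [csLoop, altDigits]
        simp only [hpos, if_pos, runsqGo, twoGo, List.count_cons,
          List.filter_cons, beq_iff_eq, decide_eq_true_eq, ih _ hlt]
        split_ifs <;> first | omega | (push_cast [List.length_cons]; ring)
      · rw [csLoop, altDigits]
        simp [hpos, runsqGo, twoGo]

lemma csLoop_eq (n score seq twos last : Int) :
    csLoop n score seq twos last =
      score + 5 * ((altDigits n).count 7 : Int)
        + 3 * (((altDigits n).filter (fun d => PySem.Int.mod d 2 = 0)).length : Int)
        + runsqGo (altDigits n) seq last + twoGo (altDigits n) twos :=
  csLoop_eq_fuel n.toNat n le_rfl score seq twos last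

-- ===== VERDICT (by name: the statement is the Claim_ definition above) =====
theorem compute_number_score_spec : Claim_equal_compute_number_score := by
  intro number _
  show _ = _
  rw [compute_number_score, compute_number_score_alt]
  rw [csLoop_eq]
  rw [altRunsq, altRunsq_foldl, altTwoBonus, altTwoBonus_foldl]
  split_ifs <;> ring
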